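-- pv_equiv track=rewrite | github.com/thewhiteflower110/Fact-Retrieval-Augmentation-for-FinQA | data/pg_data.py | program_tokenization
-- ===== SOURCE A (Python) =====
-- def program_tokenization(original_program):
--     original_program = original_program.split(',')
--     program = []
--     for tok in original_program:
--         tok = tok.strip()
--         cur_tok = ''
--         for c in tok:
--             if c == ')':
--                 if cur_tok != '':
--                     program.append(cur_tok)
--                     cur_tok = ''
--             cur_tok += c
--             if c in ['(', ')']:
--                 program.append(cur_tok)
--                 cur_tok = ''
--         if cur_tok != '':
--             program.append(cur_tok)
--     program.append('EOF')
--     return program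
-- ===== SOURCE B (Python) =====
-- import re
--
-- _TOKEN_RE = re.compile(r'[^()]*\(|\)|[^()]+')
--
-- def program_tokenization(original_program):
--     program = []
--     for tok in original_program.split(','):
--         program.extend(_TOKEN_RE.findall(tok.strip()))
--     program.append('EOF')
--     return program
-- ===== Notes on version B (the rewrite author's own statement) =====
-- stated objective: idiomatic
-- what changed: The hand-written per-character state machine (cur_tok buffer with flush rules) is replaced by a single regex tokenizer, re.findall(r'[^()]*\(|\)|[^()]+', tok), applied to each stripped comma segment.
import Mathlib
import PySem

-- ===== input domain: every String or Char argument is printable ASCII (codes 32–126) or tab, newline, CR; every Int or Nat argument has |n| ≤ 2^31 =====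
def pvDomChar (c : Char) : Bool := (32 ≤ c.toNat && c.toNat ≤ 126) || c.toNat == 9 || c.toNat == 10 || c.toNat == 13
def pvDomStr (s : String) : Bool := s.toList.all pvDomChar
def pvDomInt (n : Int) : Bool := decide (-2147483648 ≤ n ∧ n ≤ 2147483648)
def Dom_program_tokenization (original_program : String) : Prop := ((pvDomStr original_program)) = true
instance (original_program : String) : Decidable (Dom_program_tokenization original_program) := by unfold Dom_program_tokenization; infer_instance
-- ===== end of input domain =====

-- B replaces A's hand-written character state machine by a regex tokenizer
-- (re.findall over each comma segment); objective: idiomatic, same values.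

-- ===== PORT A =====
-- inner character loop of A: state (program, cur_tok); cur_tok kept as List Char
def pvInnerStep (st : List String × List Char) (c : Char) : List String × List Char :=
  let prog := st.1
  let cur := st.2
  let prog := if c = ')' ∧ cur ≠ [] then prog ++ [String.ofList cur] else prog
  let cur := if c = ')' ∧ cur ≠ [] then ([] : List Char) else cur
  let cur := cur ++ [c]
  if c = '(' ∨ c = ')' then (prog ++ [String.ofList cur], ([] : List Char)) else (prog, cur)

-- A's trailing "if cur_tok != '': program.append(cur_tok)" after the inner loop
def pvFlush (st : List String × List Char) : List String :=
  if st.2 ≠ [] then st.1 ++ [String.ofList st.2] else st.1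

def program_tokenization (original_program : String) : List String :=
  let toks := PySem.Chars.splitOn original_program.toList [',']
  let program := toks.foldl (fun prog tok =>
    let tok := PySem.Chars.strip tok
    pvFlush (tok.foldl pvInnerStep (prog, ([] : List Char)))) []
  program ++ ["EOF"]

-- ===== PORT B =====
-- hand port of re.findall(r'[^()]*\(|\)|[^()]+', tok): acc is the pending run of
-- non-paren chars; the first alternative glues the run to '(', ')' stands alone,
-- a trailing run is emitted by itself.  Exact for this pattern.
def pvScanAux (acc : List Char) : List Char → List String
  | [] => if acc = [] then [] else [String.ofList acc]
  | c :: rest =>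
    if c = '(' then String.ofList (acc ++ [c]) :: pvScanAux [] rest
    else if c = ')' then (if acc = [] then [] else [String.ofList acc]) ++ String.ofList [c] :: pvScanAux [] rest
    else pvScanAux (acc ++ [c]) rest

def program_tokenization_alt (original_program : String) : List String :=
  (PySem.Chars.splitOn original_program.toList [',']).foldl
    (fun prog tok => prog ++ pvScanAux [] (PySem.Chars.strip tok)) [] ++ ["EOF"]

-- ===== PRECONDITION & SPEC =====
def Spec_program_tokenization (original_program : String) (out : List String) : Prop := out = program_tokenization_alt original_program
instance (original_program : String) (out : List String) : Decidable (Spec_program_tokenization original_program out) := by unfold Spec_program_tokenization; infer_instance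

-- ===== CLAIM (what is proved, stated in full; the proofs are below) =====
def Claim_equal_program_tokenization : Prop := ∀ (original_program : String), Dom_program_tokenization original_program → Spec_program_tokenization original_program (program_tokenization original_program)

-- ===== LEMMAS AND PROOFS =====

-- A's inner loop plus its final flush produces exactly the regex token list.
theorem pvInner_eq (cs : List Char) : ∀ (prog : List String) (acc : List Char),
    pvFlush (cs.foldl pvInnerStep (prog, acc)) = prog ++ pvScanAux acc cs := by
  induction cs with
  | nil =>
    intro prog acc
    by_cases h : acc = [] <;> simp [pvScanAux, pvFlush, h]
  | cons c rest ih =>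
    intro prog acc
    simp only [List.foldl_cons]
    by_cases hc1 : c = '('
    · subst hc1
      simp only [pvInnerStep, pvScanAux]
      norm_num
      rw [ih]
      simp
    · by_cases hc2 : c = ')'
      · subst hc2
        by_cases ha : acc = []
        · subst ha
          simp only [pvInnerStep, pvScanAux]
          norm_num
          rw [ih]; simp
        · simp only [pvInnerStep, pvScanAux]
          simp only [ha, ne_eq, not_false_iff, and_true, if_pos]
          norm_num
          rw [ih]
          simp
      · simp only [pvInnerStep, pvScanAux]
        norm_num [hc1, hc2]
        rw [ih]

-- ===== VERDICT (by name: the statement is the Claim_ definition above) =====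
-- both outer loops over the comma segments agree, from any accumulated program
theorem pvOuter_eq (toks : List (List Char)) : ∀ (init : List String),
    toks.foldl (fun prog tok => pvFlush (List.foldl pvInnerStep (prog, ([] : List Char)) (PySem.Chars.strip tok))) init
      = toks.foldl (fun prog tok => prog ++ pvScanAux [] (PySem.Chars.strip tok)) init := by
  intro init
  simp only [pvInner_eq]

theorem program_tokenization_spec : Claim_equal_program_tokenization := by
  intro s _
  unfold Spec_program_tokenization program_tokenization program_tokenization_alt
  dsimp only
  rw [pvOuter_eq]
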